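-- pv_equiv track=rewrite | github.com/RavenDS/flatout-blender-tools | scripts/bgm_tool_psp.py | _split_pc_strip
-- ===== SOURCE A (Python) =====
-- def _split_pc_strip(indices):
--     """Split a FlatOut 2 PC triangle strip into clean sub-strips.
--
--     FO2 PC strips join sub-strips with a degenerate run of the form:
--       [..., A, A, B, B, B, C, ...]
--     where A is the last vertex of the preceding sub-strip (repeated once)
--     and B is the first vertex of the next sub-strip (repeated twice before
--     the actual sub-strip content begins).
--
--     This function removes all such join runs and returns the list of
--     sub-strip index sequences (each at least 3 elements long).
--     """
--     subs = []
--     n = len(indices)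
--     i = 0
--     while i < n:
--         start = i
--         # advance j to the first position where indices[j] == indices[j+1]
--         j = i
--         while j < n - 1 and indices[j] != indices[j + 1]:
--             j += 1
--         sub = indices[start : j + 1]
--         if len(sub) >= 3:
--             subs.append(sub)
--         if j >= n - 1:
--             break
--         # skip the A-run (repeated last vert of this sub-strip)
--         A = indices[j]
--         i = j
--         while i < n and indices[i] == A:
--             i += 1
--         if i >= n:
--             break
--         # advance to the last B in the B-run (first vert of next sub-strip)
--         B = indices[i]
--         while i < n - 1 and indices[i + 1] == B:
--             i += 1
--         # i now points to the last B, which is the first vert of the next sub-strip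
--     return subs
-- ===== SOURCE B (Python) =====
-- def _split_pc_strip(indices):
--     """Split a FlatOut 2 PC triangle strip into clean sub-strips.
--
--     Run-length-encode the indices into (value, count) groups, then walk the
--     groups once: count-1 groups extend the current sub-strip; a group with
--     count >= 2 is a join run -- its value closes the current sub-strip (kept
--     if it has at least 3 indices) and the following group's value (one copy)
--     starts the next sub-strip.
--     """
--     groups = []
--     for v in indices:
--         if groups and groups[-1][0] == v:
--             groups[-1][1] += 1
--         else:
--             groups.append([v, 1])
--     subs = []
--     cur = []
--     k = 0
--     m = len(groups)
--     while k < m: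
--         v, c = groups[k]
--         cur.append(v)
--         k += 1
--         if c >= 2:
--             if len(cur) >= 3:
--                 subs.append(cur)
--             cur = []
--             if k < m:
--                 cur = [groups[k][0]]
--                 k += 1
--     if len(cur) >= 3:
--         subs.append(cur)
--     return subs
-- ===== Notes on version B (the rewrite author's own statement) =====
-- stated objective: alternative
-- what changed: Replaces A's three nested forward-pointer scans over indices with a run-length-encoding pass into (value, count) groups followed by one walk over the groups that rebuilds sub-strips (count-1 groups extend, a count>=2 join run closes the sub-strip and the next group's value restarts it).
import Mathlib
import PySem

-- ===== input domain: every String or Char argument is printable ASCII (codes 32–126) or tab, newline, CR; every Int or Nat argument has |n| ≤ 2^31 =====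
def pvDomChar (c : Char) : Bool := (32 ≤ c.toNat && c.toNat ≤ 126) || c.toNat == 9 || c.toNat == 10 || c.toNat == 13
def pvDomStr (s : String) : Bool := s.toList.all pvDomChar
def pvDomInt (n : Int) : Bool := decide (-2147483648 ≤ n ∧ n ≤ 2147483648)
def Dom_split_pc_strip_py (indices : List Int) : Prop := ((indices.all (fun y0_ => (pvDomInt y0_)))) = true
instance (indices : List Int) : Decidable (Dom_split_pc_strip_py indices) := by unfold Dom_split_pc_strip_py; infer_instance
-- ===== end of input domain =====

-- B replaces A's three nested forward-pointer scans by a run-length-encode pass plus one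
-- walk over the (value, count) groups; same return value, alternative decomposition.

-- ===== PORT A =====
-- Loop counters i, j, n are nonnegative throughout the Python, so they are Nat here;
-- indices[j] reads happen only under guards that put j in range, so List.getD is exact;
-- the slice indices[start:j+1] (0 ≤ start ≤ j+1) is (drop start).take (j+1-start), exact here.
-- The outer while carries fuel n+1 (i strictly increases each iteration, so it never runs out).

-- inner loop: while j < n - 1 and indices[j] != indices[j+1]: j += 1
def aFindJ (l : List Int) (n j : Nat) : Nat :=
  if h : j < n - 1 ∧ l.getD j 0 ≠ l.getD (j + 1) 0 then aFindJ l n (j + 1) else j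
termination_by n - j
decreasing_by exact Nat.sub_succ_lt_self n j (Nat.lt_of_lt_of_le h.1 (n.sub_le 1))

-- inner loop: while i < n and indices[i] == A: i += 1
def aSkip (l : List Int) (n i : Nat) (A : Int) : Nat :=
  if h : i < n ∧ l.getD i 0 = A then aSkip l n (i + 1) A else i
termination_by n - i
decreasing_by exact Nat.sub_succ_lt_self n i h.1

-- inner loop: while i < n - 1 and indices[i+1] == B: i += 1
def aLastB (l : List Int) (n i : Nat) (B : Int) : Nat :=
  if h : i < n - 1 ∧ l.getD (i + 1) 0 = B then aLastB l n (i + 1) B else i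
termination_by n - i
decreasing_by exact Nat.sub_succ_lt_self n i (Nat.lt_of_lt_of_le h.1 (n.sub_le 1))

def aLoop (l : List Int) (n : Nat) (fuel : Nat) (i : Nat) (subs : List (List Int)) : List (List Int) :=
  match fuel with
  | 0 => subs
  | fuel + 1 =>
    if i < n then
      let start := i
      let j := aFindJ l n i
      let sub := (l.drop start).take (j + 1 - start)
      let subs := if 3 ≤ sub.length then subs ++ [sub] else subs
      if n - 1 ≤ j then subs
      else
        let A := l.getD j 0
        let i := aSkip l n j A
        if n ≤ i then subs
        else
          let B := l.getD i 0
          let i := aLastB l n i B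
          aLoop l n fuel i subs
    else subs

def split_pc_strip_py (indices : List Int) : List (List Int) :=
  aLoop indices indices.length (indices.length + 1) 0 []

-- ===== PORT B =====
-- run-length encoding pass: groups[-1] access/update becomes getLast?/dropLast ++ [_]
def rleStep (gs : List (Int × Nat)) (v : Int) : List (Int × Nat) :=
  match gs.getLast? with
  | some (w, c) => if w = v then gs.dropLast ++ [(w, c + 1)] else gs ++ [(v, 1)]
  | none => [(v, 1)]

def rleB (l : List Int) : List (Int × Nat) := l.foldl rleStep []

-- the while k < m walk over groups; consuming groups[k] (and, after a join run,
-- also groups[k+1]) is the structural recursion on the group list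
def walkB : List (Int × Nat) → List Int → List (List Int)
  | [], cur => if 3 ≤ cur.length then [cur] else []
  | (v, c) :: gs, cur =>
    let cur := cur ++ [v]
    if 2 ≤ c then
      (if 3 ≤ cur.length then [cur] else []) ++
      (match gs with
       | [] => []
       | (b, _) :: gs' => walkB gs' [b])
    else walkB gs cur

def split_pc_strip_py_alt (indices : List Int) : List (List Int) :=
  walkB (rleB indices) []

-- ===== PRECONDITION & SPEC =====
def Spec_split_pc_strip_py (indices : List Int) (out : List (List Int)) : Prop := out = split_pc_strip_py_alt indices
instance (indices : List Int) (out : List (List Int)) : Decidable (Spec_split_pc_strip_py indices out) := by unfold Spec_split_pc_strip_py; infer_instance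

-- ===== CLAIM (what is proved, stated in full; the proofs are below) =====
def Claim_equal_split_pc_strip_py : Prop := ∀ (indices : List Int), Dom_split_pc_strip_py indices → Spec_split_pc_strip_py indices (split_pc_strip_py indices)

-- ===== LEMMAS AND PROOFS =====

-- common functional description: cut off the first sub-strip (up to and including the
-- first element of the first adjacent-duplicate run), keep the remainder from that run on
def cut : List Int → List Int × List Int
  | [] => ([], [])
  | [x] => ([x], [])
  | x :: y :: r => if x = y then ([x], x :: y :: r) else
      ((x :: (cut (y :: r)).1), (cut (y :: r)).2)

def emit (cur : List Int) : List (List Int) := if 3 ≤ cur.length then [cur] else []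

theorem cut_snd_len : ∀ m : List Int, (cut m).2.length ≤ m.length := by
  intro m
  induction m with
  | nil => simp [cut]
  | cons x xs ih =>
    cases xs with
    | nil => simp [cut]
    | cons y r =>
      by_cases h : x = y
      · simp [cut, h]
      · simp only [cut, if_neg h]
        simp only [List.length_cons] at ih ⊢
        omega

mutual
def F (cur m : List Int) : List (List Int) :=
  emit (cur ++ (cut m).1) ++ Fcont (cut m).2
termination_by (m.length, 2)
decreasing_by
  have h := cut_snd_len m
  rcases Nat.lt_or_ge (cut m).2.length m.length with hlt | hge
  · exact Prod.Lex.left _ _ hlt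
  · have he : (cut m).2.length = m.length := by omega
    rw [he]
    exact Prod.Lex.right _ (by omega)
def Fcont : List Int → List (List Int)
  | [] => []
  | x :: t => Fcont2 (List.dropWhile (· == x) (x :: t))
termination_by q => (q.length, 1)
decreasing_by
  apply Prod.Lex.left
  simp only [List.dropWhile_cons, BEq.rfl, if_true]
  have := List.length_dropWhile_le (· == x) t
  simp only [List.length_cons]
  omega
def Fcont2 : List Int → List (List Int)
  | [] => []
  | b :: r => F [b] (List.dropWhile (· == b) r)
termination_by q => (q.length, 0)
decreasing_by
  apply Prod.Lex.left
  have := List.length_dropWhile_le (· == b) r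
  simp only [List.length_cons]
  omega
end

theorem F_def (cur m : List Int) : F cur m = emit (cur ++ (cut m).1) ++ Fcont (cut m).2 := by rw [F]

theorem Fcont_nil : Fcont [] = [] := by rw [Fcont]

theorem Fcont_cons (x : Int) (t : List Int) :
    Fcont (x :: t) = Fcont2 (List.dropWhile (· == x) (x :: t)) := by rw [Fcont]

theorem Fcont2_nil : Fcont2 [] = [] := by rw [Fcont2]

theorem Fcont2_cons (b : Int) (r : List Int) :
    Fcont2 (b :: r) = F [b] (List.dropWhile (· == b) r) := by rw [Fcont2]

theorem dropWhile_head_false {α : Type} (p : α → Bool) :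
    ∀ (l : List α) y t, l.dropWhile p = y :: t → p y = false := by
  intro l
  induction l with
  | nil => intro y t h; simp [List.dropWhile] at h
  | cons a l ih =>
    intro y t h
    rw [List.dropWhile_cons] at h
    by_cases hp : p a
    · simp [hp] at h; exact ih y t h
    · simp [hp] at h; simp [← h.1]; simpa using hp

-- ===== A-side lemmas =====

theorem aFindJ_ge (l : List Int) (n : Nat) : ∀ j, j ≤ aFindJ l n j := by
  intro j
  fun_induction aFindJ l n j with
  | case1 j h ih => omega
  | case2 j h => omega

theorem aFindJ_le (l : List Int) (n : Nat) : ∀ j, j ≤ n - 1 → aFindJ l n j ≤ n - 1 := by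
  intro j
  fun_induction aFindJ l n j with
  | case1 j h ih => intro _; exact ih (by omega)
  | case2 j h => intro hj; exact hj

theorem cut_drop (l : List Int) : ∀ i, i < l.length →
    cut (l.drop i) = ((l.drop i).take (aFindJ l l.length i + 1 - i),
      if aFindJ l l.length i < l.length - 1 then l.drop (aFindJ l l.length i) else []) := by
  intro i
  fun_induction aFindJ l l.length i with
  | case1 i h ih =>
    intro hi
    obtain ⟨hlt, hne⟩ := h
    have hi1 : i + 1 < l.length := by omega
    have hd0 : l.drop i = l[i] :: l.drop (i + 1) := List.drop_eq_getElem_cons hi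
    have hd1 : l.drop (i + 1) = l[i+1] :: l.drop (i + 2) := List.drop_eq_getElem_cons hi1
    have hxy : l[i] ≠ l[i+1] := by
      rw [List.getD_eq_getElem l 0 hi, List.getD_eq_getElem l 0 hi1] at hne
      exact hne
    have ihs := ih hi1
    have hge : i + 1 ≤ aFindJ l l.length (i + 1) := aFindJ_ge l l.length (i + 1)
    rw [hd0, hd1, cut, if_neg hxy, ← hd1, ihs]
    have htake : (l[i] :: l.drop (i + 1)).take (aFindJ l l.length (i + 1) + 1 - i) =
        l[i] :: (l.drop (i + 1)).take (aFindJ l l.length (i + 1) + 1 - (i + 1)) := by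
      have : aFindJ l l.length (i + 1) + 1 - i = (aFindJ l l.length (i + 1) + 1 - (i + 1)) + 1 := by
        omega
      rw [this, List.take_succ_cons]
    rw [htake]
  | case2 i h =>
    intro hi
    by_cases hlt : i < l.length - 1
    · have heq : l.getD i 0 = l.getD (i + 1) 0 := by
        by_contra hc; exact h ⟨hlt, hc⟩
      have hi1 : i + 1 < l.length := by omega
      have hd0 : l.drop i = l[i] :: l.drop (i + 1) := List.drop_eq_getElem_cons hi
      have hd1 : l.drop (i + 1) = l[i+1] :: l.drop (i + 2) := List.drop_eq_getElem_cons hi1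
      have hxy : l[i] = l[i+1] := by
        rw [List.getD_eq_getElem l 0 hi, List.getD_eq_getElem l 0 hi1] at heq
        exact heq
      rw [hd0, hd1, cut, if_pos hxy, ← hd1, ← hd0]
      rw [if_pos hlt, show i + 1 - i = 1 from by omega, hd0, List.take_succ_cons]
      simp
    · have hieq : i = l.length - 1 := by omega
      have hd0 : l.drop i = l[i] :: l.drop (i + 1) := List.drop_eq_getElem_cons hi
      have hnil : l.drop (i + 1) = [] := List.drop_eq_nil_of_le (by omega)
      rw [hd0, hnil, cut]
      rw [if_neg hlt, show i + 1 - i = 1 from by omega]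
      simp

theorem aSkip_ge (l : List Int) (n : Nat) : ∀ i A, i ≤ aSkip l n i A := by
  intro i A
  fun_induction aSkip l n i A with
  | case1 i h ih => omega
  | case2 i h => omega

theorem aSkip_spec (l : List Int) : ∀ i A, i ≤ l.length →
    l.drop (aSkip l l.length i A) = List.dropWhile (· == A) (l.drop i) ∧
    i ≤ aSkip l l.length i A ∧ aSkip l l.length i A ≤ l.length := by
  intro i A
  fun_induction aSkip l l.length i A with
  | case1 i h ih =>
    intro _
    obtain ⟨hi, hA⟩ := h
    obtain ⟨ih1, ih2, ih3⟩ := ih (by omega)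
    refine ⟨?_, by omega, ih3⟩
    rw [ih1, List.drop_eq_getElem_cons hi, List.dropWhile_cons]
    have : l[i] = A := by rw [← hA]; exact (List.getD_eq_getElem l 0 hi).symm
    simp [this]
  | case2 i h =>
    intro hle
    refine ⟨?_, le_refl _, ?_⟩
    · by_cases hi : i < l.length
      · rw [List.drop_eq_getElem_cons hi, List.dropWhile_cons]
        have hne : l[i] ≠ A := by
          intro hc; exact h ⟨hi, by rw [List.getD_eq_getElem l 0 hi]; exact hc⟩
        simp [hne]
      · rw [List.drop_eq_nil_of_le (by omega : l.length ≤ i)]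
        simp
    · by_cases hi : i < l.length
      · omega
      · omega

theorem aSkip_gt (l : List Int) (i : Nat) (A : Int) (hi : i < l.length)
    (hA : l.getD i 0 = A) : i + 1 ≤ aSkip l l.length i A := by
  rw [aSkip, dif_pos ⟨hi, hA⟩]
  have h := aSkip_ge l l.length (i + 1) A
  omega

theorem aLastB_spec (l : List Int) : ∀ i B, i < l.length → l.getD i 0 = B →
    l.drop (aLastB l l.length i B) = B :: List.dropWhile (· == B) (l.drop (i + 1)) ∧
    i ≤ aLastB l l.length i B ∧ aLastB l l.length i B < l.length := by
  intro i B
  fun_induction aLastB l l.length i B with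
  | case1 i h ih =>
    intro hi hB
    obtain ⟨hlt, hB1⟩ := h
    obtain ⟨ih1, ih2, ih3⟩ := ih (by omega) hB1
    refine ⟨?_, by omega, ih3⟩
    rw [ih1]
    have hi1 : i + 1 < l.length := by omega
    rw [List.drop_eq_getElem_cons hi1, List.dropWhile_cons]
    have : l[i+1] = B := by rw [← hB1]; exact (List.getD_eq_getElem l 0 hi1).symm
    simp [this]
  | case2 i h =>
    intro hi hB
    refine ⟨?_, le_refl _, hi⟩
    rw [List.drop_eq_getElem_cons hi]
    have hx : l[i] = B := by rw [← hB]; exact (List.getD_eq_getElem l 0 hi).symm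
    rw [hx]
    congr 1
    by_cases hlt : i < l.length - 1
    · have hne : l.getD (i+1) 0 ≠ B := fun hc => h ⟨hlt, hc⟩
      have hi1 : i + 1 < l.length := by omega
      rw [List.drop_eq_getElem_cons hi1, List.dropWhile_cons]
      have : l[i+1] ≠ B := by rw [List.getD_eq_getElem l 0 hi1] at hne; exact hne
      simp [this]
    · rw [List.drop_eq_nil_of_le (by omega : l.length ≤ i + 1)]
      simp

theorem cut_cons_ne (x y : Int) (t : List Int) (hxy : x ≠ y) :
    cut (x :: y :: t) = (x :: (cut (y :: t)).1, (cut (y :: t)).2) := by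
  simp only [cut, if_neg hxy]

theorem F_step (cur : List Int) (x y : Int) (t : List Int) (hxy : x ≠ y) :
    F cur (x :: y :: t) = F (cur ++ [x]) (y :: t) := by
  rw [F_def, F_def, cut_cons_ne x y t hxy]
  simp

theorem F_start (b : Int) (r : List Int) :
    F [] (b :: List.dropWhile (· == b) r) = F [b] (List.dropWhile (· == b) r) := by
  cases hq : List.dropWhile (· == b) r with
  | nil =>
    rw [F_def, F_def]
    simp [cut, emit, Fcont_nil]
  | cons y t =>
    have hy : (y == b) = false := dropWhile_head_false _ r y t hq
    have hby : b ≠ y := by intro hc; rw [hc] at hy; simp at hy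
    exact F_step [] b y t hby

theorem aLoop_eq_F (l : List Int) : ∀ fuel i subs, i ≤ l.length → l.length - i < fuel →
    aLoop l l.length fuel i subs = subs ++ F [] (l.drop i) := by
  intro fuel
  induction fuel with
  | zero => intro i subs h1 h2; omega
  | succ f ih =>
    intro i subs hi hf
    rw [aLoop]
    by_cases hin : i < l.length
    · rw [if_pos hin]
      simp only []
      have hji : i ≤ aFindJ l l.length i := aFindJ_ge l l.length i
      have hjle : aFindJ l l.length i ≤ l.length - 1 := aFindJ_le l l.length i (by omega)
      have hc := cut_drop l i hin
      rw [F_def, hc]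
      simp only []
      by_cases hend : l.length - 1 ≤ aFindJ l l.length i
      · rw [if_pos hend, if_neg (by omega : ¬ aFindJ l l.length i < l.length - 1), Fcont_nil]
        by_cases h3 : 3 ≤ ((l.drop i).take (aFindJ l l.length i + 1 - i)).length
        · rw [if_pos h3]
          simp only [emit, List.nil_append, if_pos h3, List.append_nil, List.append_assoc]
        · rw [if_neg h3]
          simp only [emit, List.nil_append, if_neg h3, List.append_nil, List.append_assoc]
      · rw [if_neg hend, if_pos (by omega : aFindJ l l.length i < l.length - 1)]
        have hjlt : aFindJ l l.length i < l.length := by omega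
        have hdj : l.drop (aFindJ l l.length i)
            = l.getD (aFindJ l l.length i) 0 :: l.drop (aFindJ l l.length i + 1) := by
          rw [List.getD_eq_getElem l 0 hjlt]
          exact List.drop_eq_getElem_cons hjlt
        rw [hdj, Fcont_cons, ← hdj]
        have hskip := aSkip_spec l (aFindJ l l.length i) (l.getD (aFindJ l l.length i) 0) (by omega)
        rw [← hskip.1]
        by_cases hni : l.length ≤ aSkip l l.length (aFindJ l l.length i) (l.getD (aFindJ l l.length i) 0)
        · rw [if_pos hni]
          have hdrop : l.drop (aSkip l l.length (aFindJ l l.length i) (l.getD (aFindJ l l.length i) 0)) = [] :=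
            List.drop_eq_nil_of_le hni
          rw [hdrop, Fcont2_nil]
          by_cases h3 : 3 ≤ ((l.drop i).take (aFindJ l l.length i + 1 - i)).length
          · rw [if_pos h3]
            simp only [emit, List.nil_append, if_pos h3, List.append_nil, List.append_assoc]
          · rw [if_neg h3]
            simp only [emit, List.nil_append, if_neg h3, List.append_nil, List.append_assoc]
        · rw [if_neg hni]
          have hilt : aSkip l l.length (aFindJ l l.length i) (l.getD (aFindJ l l.length i) 0) < l.length := by omega
          have hdi' : l.drop (aSkip l l.length (aFindJ l l.length i) (l.getD (aFindJ l l.length i) 0))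
              = l.getD (aSkip l l.length (aFindJ l l.length i) (l.getD (aFindJ l l.length i) 0)) 0
                :: l.drop (aSkip l l.length (aFindJ l l.length i) (l.getD (aFindJ l l.length i) 0) + 1) := by
            rw [List.getD_eq_getElem l 0 hilt]
            exact List.drop_eq_getElem_cons hilt
          rw [hdi', Fcont2_cons]
          have hlast := aLastB_spec l
            (aSkip l l.length (aFindJ l l.length i) (l.getD (aFindJ l l.length i) 0))
            (l.getD (aSkip l l.length (aFindJ l l.length i) (l.getD (aFindJ l l.length i) 0)) 0)
            hilt rfl
          have hgt : aFindJ l l.length i + 1 ≤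
              aSkip l l.length (aFindJ l l.length i) (l.getD (aFindJ l l.length i) 0) :=
            aSkip_gt l (aFindJ l l.length i) (l.getD (aFindJ l l.length i) 0) hjlt rfl
          rw [ih _ _ (by omega) (by omega), hlast.1, F_start]
          by_cases h3 : 3 ≤ ((l.drop i).take (aFindJ l l.length i + 1 - i)).length
          · rw [if_pos h3]
            simp only [emit, List.nil_append, if_pos h3, List.append_nil, List.append_assoc]
          · rw [if_neg h3]
            simp only [emit, List.nil_append, if_neg h3, List.append_nil, List.append_assoc]
    · rw [if_neg hin]
      have hieq : l.drop i = [] := List.drop_eq_nil_of_le (by omega)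
      rw [hieq, F_def]
      simp [cut, emit, Fcont_nil]

-- ===== B-side lemmas =====

def rleT : List Int → List (Int × Nat)
  | [] => []
  | x :: xs => (x, 1 + (xs.takeWhile (· == x)).length) :: rleT (xs.dropWhile (· == x))
termination_by l => l.length
decreasing_by
  have := List.length_dropWhile_le (· == x) xs
  simp at *; omega

theorem rleB_foldl (m : List Int) : ∀ (acc : List (Int × Nat)) (v : Int) (c : Nat),
    List.foldl rleStep (acc ++ [(v, c)]) m =
      acc ++ (v, c + (m.takeWhile (· == v)).length) :: rleT (m.dropWhile (· == v)) := by
  induction m with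
  | nil => intro acc v c; simp [rleT]
  | cons x xs ih =>
    intro acc v c
    rw [List.foldl_cons]
    have hstep : rleStep (acc ++ [(v, c)]) x =
        if v = x then acc ++ [(v, c + 1)] else (acc ++ [(v, c)]) ++ [(x, 1)] := by
      rw [rleStep, List.getLast?_concat]
      simp [List.dropLast_concat]
    by_cases hvx : v = x
    · rw [hstep, if_pos hvx, ih acc v (c + 1)]
      have htw : List.takeWhile (· == v) (x :: xs) = x :: List.takeWhile (· == v) xs := by
        simp [List.takeWhile_cons, hvx.symm]
      have hdw : List.dropWhile (· == v) (x :: xs) = List.dropWhile (· == v) xs := by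
        simp [List.dropWhile_cons, hvx.symm]
      rw [htw, hdw]
      simp only [List.length_cons]
      rw [show c + ((List.takeWhile (· == v) xs).length + 1)
            = c + 1 + (List.takeWhile (· == v) xs).length from by omega]
    · rw [hstep, if_neg hvx, ih (acc ++ [(v, c)]) x 1]
      have hxv : (x == v) = false := by simp; intro hc; exact hvx hc.symm
      have htw : List.takeWhile (· == v) (x :: xs) = [] := by
        simp [List.takeWhile_cons, hxv]
      have hdw : List.dropWhile (· == v) (x :: xs) = x :: xs := by
        simp [List.dropWhile_cons, hxv]
      rw [htw, hdw, rleT]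
      simp

theorem rleB_eq_rleT (m : List Int) : rleB m = rleT m := by
  cases m with
  | nil => simp [rleB, rleT]
  | cons x xs =>
    have h0 : rleStep [] x = [(x, 1)] := rfl
    rw [rleB, List.foldl_cons, h0, show [(x, 1)] = [] ++ [(x, 1)] from rfl,
      rleB_foldl xs [] x 1, rleT]
    simp

theorem walkB_nil (cur : List Int) : walkB [] cur = if 3 ≤ cur.length then [cur] else [] := rfl

theorem walkB_cons (v : Int) (c : Nat) (gs : List (Int × Nat)) (cur : List Int) :
    walkB ((v, c) :: gs) cur =
      if 2 ≤ c then
        (if 3 ≤ (cur ++ [v]).length then [cur ++ [v]] else []) ++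
        (match gs with
         | [] => []
         | (b, _) :: gs' => walkB gs' [b])
      else walkB gs (cur ++ [v]) := by
  rw [walkB.eq_def]

theorem rleT_nil : rleT [] = [] := by simp [rleT]

theorem rleT_cons (x : Int) (xs : List Int) :
    rleT (x :: xs) = (x, 1 + (xs.takeWhile (· == x)).length) :: rleT (xs.dropWhile (· == x)) := by
  rw [rleT]

theorem walkB_eq_F_aux : ∀ (N : Nat) (m : List Int), m.length ≤ N → ∀ cur, walkB (rleT m) cur = F cur m := by
  intro N
  induction N with
  | zero =>
    intro m hm cur
    have : m = [] := List.eq_nil_of_length_eq_zero (by omega)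
    subst this
    rw [rleT_nil, walkB_nil, F_def]
    simp [cut, emit, Fcont_nil]
  | succ N ihN =>
    intro m hm cur
    cases m with
    | nil =>
      rw [rleT_nil, walkB_nil, F_def]
      simp [cut, emit, Fcont_nil]
    | cons x xs =>
      rw [rleT_cons]
      cases xs with
      | nil =>
        simp only [List.takeWhile_nil, List.length_nil, List.dropWhile_nil]
        rw [rleT_nil, walkB_cons, if_neg (by omega), walkB_nil, F_def]
        simp [cut, emit, Fcont_nil]
      | cons y t =>
        by_cases hyx : y = x
        · -- duplicate at the front: join run
          have htw : List.takeWhile (· == x) (y :: t) = y :: List.takeWhile (· == x) t := by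
            simp [List.takeWhile_cons, hyx]
          have hdw : List.dropWhile (· == x) (y :: t) = List.dropWhile (· == x) t := by
            simp [List.dropWhile_cons, hyx]
          rw [htw, hdw]
          simp only [List.length_cons]
          rw [walkB_cons, if_pos (by omega)]
          have hcutm : cut (x :: y :: t) = ([x], x :: y :: t) := by
            rw [cut, if_pos hyx.symm]
          rw [F_def, hcutm]
          simp only []
          have hdm : List.dropWhile (· == x) (x :: y :: t) = List.dropWhile (· == x) t := by
            simp [List.dropWhile_cons, hyx]
          rw [Fcont_cons, hdm]
          cases hq : List.dropWhile (· == x) t with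
          | nil =>
            rw [rleT_nil, Fcont2_nil]
            simp [emit]
          | cons b q =>
            have hlen : (List.dropWhile (· == b) q).length ≤ N := by
              have h1 : (List.dropWhile (· == b) q).length ≤ q.length := List.length_dropWhile_le _ _
              have h2 : (b :: q).length ≤ t.length := by
                rw [← hq]; exact List.length_dropWhile_le _ _
              simp only [List.length_cons] at h2 hm
              omega
            rw [rleT_cons, Fcont2_cons]
            simp only []
            rw [ihN _ hlen [b]]
            simp [emit]
        · -- distinct neighbours: extend the current sub-strip
          have hyxb : (y == x) = false := by simp [hyx]
          have htw : List.takeWhile (· == x) (y :: t) = [] := by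
            simp [List.takeWhile_cons, hyxb]
          have hdw : List.dropWhile (· == x) (y :: t) = y :: t := by
            simp [List.dropWhile_cons, hyxb]
          rw [htw, hdw]
          simp only [List.length_nil]
          rw [walkB_cons, if_neg (by omega)]
          rw [ihN (y :: t) (by simp at hm ⊢; omega) (cur ++ [x])]
          exact (F_step cur x y t (fun hc => hyx hc.symm)).symm

-- ===== VERDICT (by name: the statement is the Claim_ definition above) =====
theorem split_pc_strip_py_spec : Claim_equal_split_pc_strip_py := by
  intro l _
  unfold Spec_split_pc_strip_py split_pc_strip_py split_pc_strip_py_alt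
  rw [aLoop_eq_F l (l.length + 1) 0 [] (by omega) (by omega)]
  rw [rleB_eq_rleT, walkB_eq_F_aux l.length l (le_refl _) []]
  simp
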